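-- pv_equiv track=rewrite | github.com/golba98/hp-prime-ppl-python | src/ppl_emulator/linter.py | _count_args
-- ===== SOURCE A (Python) =====
-- def _erase_strings(line: str) -> str:
--     """Replace the *contents* of string literals with spaces so regex
--     patterns never match text inside quotes. Handles PPL escaped quotes ("")
--     and backslash-escaped quotes (\\")."""
--     result, in_str = [], False
--     i = 0
--     while i < len(line):
--         ch = line[i]
--         if ch == '"':
--             if in_str:
--                 # Check for escaped quote ""
--                 if i + 1 < len(line) and line[i+1] == '"':
--                     result.append('  ') # Two spaces for ""
--                     i += 1
--                 else:
--                     in_str = False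
--                     result.append('"')
--             else:
--                 in_str = True
--                 result.append('"')
--         elif in_str:
--             if ch == '\\' and i + 1 < len(line) and line[i+1] == '"':
--                 result.append('  ') # Two spaces for \"
--                 i += 1
--             else:
--                 result.append(' ')
--         else:
--             result.append(ch)
--         i += 1
--     return ''.join(result)
--
-- def _count_args(args_str: str) -> int:
--     """Count top-level commas in the argument string to determine arg count."""
--     if not args_str.strip():
--         return 0
--     safe = _erase_strings(args_str)
--     depth: int = 0
--     commas: int = 0
--     for ch in safe:
--         if ch in '([{':
--             depth += 1
--         elif ch in ')]}' :
--             depth -= 1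
--         elif ch == ',' and depth == 0:
--             commas += 1
--     return commas + 1
-- ===== SOURCE B (Python) =====
-- def _count_args(args_str: str) -> int:
--     """One-pass rewrite: track string state, bracket depth and top-level commas
--     in a single scan, with no erased intermediate string."""
--     if not args_str.strip():
--         return 0
--     in_str = False
--     depth = 0
--     commas = 0
--     i = 0
--     n = len(args_str)
--     while i < n:
--         ch = args_str[i]
--         if in_str:
--             if ch == '"':
--                 if i + 1 < n and args_str[i + 1] == '"':
--                     i += 1  # escaped "" stays inside the string
--                 else:
--                     in_str = False
--             elif ch == '\\' and i + 1 < n and args_str[i + 1] == '"':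
--                 i += 1  # backslash-escaped quote stays inside the string
--         elif ch == '"':
--             in_str = True
--         elif ch in '([{':
--             depth += 1
--         elif ch in ')]}':
--             depth -= 1
--         elif ch == ',' and depth == 0:
--             commas += 1
--         i += 1
--     return commas + 1
-- ===== Notes on version B (the rewrite author's own statement) =====
-- stated objective: simpler
-- what changed: Fused A's build-then-scan decomposition (erase string contents into a new intermediate string, then scan it for brackets/commas) into a single one-pass scan that tracks in-string state, depth and top-level commas together, eliminating the _erase_strings helper and the intermediate string allocation.
import Mathlib
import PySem

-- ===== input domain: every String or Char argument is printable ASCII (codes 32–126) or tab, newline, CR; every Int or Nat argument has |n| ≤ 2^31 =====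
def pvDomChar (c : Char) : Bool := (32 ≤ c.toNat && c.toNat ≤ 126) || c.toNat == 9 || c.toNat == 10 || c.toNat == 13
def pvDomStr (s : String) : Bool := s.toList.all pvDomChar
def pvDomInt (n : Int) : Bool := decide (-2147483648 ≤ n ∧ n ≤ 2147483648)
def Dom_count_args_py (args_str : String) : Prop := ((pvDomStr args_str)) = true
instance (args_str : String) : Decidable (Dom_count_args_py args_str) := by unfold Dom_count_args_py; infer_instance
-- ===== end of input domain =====

-- B fuses A's erase-then-scan two-pass into one scan; objective: simpler (no helper, no intermediate string).

-- ===== PORT A =====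
-- _erase_strings: while loop over indices, transcribed as recursion on the char list
-- (the `i += 1` skip after "" / \" consumes two chars of the list).
def eraseStrings (inStr : Bool) (l : List Char) : List Char :=
  match inStr, l with
  | _, [] => []
  | true, '"' :: '"' :: rest' => ' ' :: ' ' :: eraseStrings true rest'
  | true, '"' :: rest => '"' :: eraseStrings false rest
  | false, '"' :: rest => '"' :: eraseStrings true rest
  | true, '\\' :: '"' :: rest' => ' ' :: ' ' :: eraseStrings true rest'
  | true, _ :: rest => ' ' :: eraseStrings true rest
  | false, ch :: rest => ch :: eraseStrings false rest

-- the body of _count_args's for-loop over the erased string, state (depth, commas)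
def countStep (st : Int × Int) (ch : Char) : Int × Int :=
  if ch = '(' ∨ ch = '[' ∨ ch = '{' then (st.1 + 1, st.2)
  else if ch = ')' ∨ ch = ']' ∨ ch = '}' then (st.1 - 1, st.2)
  else if ch = ',' ∧ st.1 = 0 then (st.1, st.2 + 1)
  else st

def count_args_py (args_str : String) : Int :=
  if (PySem.Str.strip args_str).toList = [] then 0
  else
    let safe := eraseStrings false args_str.toList
    (safe.foldl countStep ((0 : Int), (0 : Int))).2 + 1

-- ===== PORT B =====
-- Source B's single while loop: state in_str / depth / commas, two-char lookahead for "" and \".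
def scanArgs (inStr : Bool) (depth commas : Int) (l : List Char) : Int :=
  match inStr, l with
  | _, [] => commas
  | true, '"' :: '"' :: rest' => scanArgs true depth commas rest'
  | true, '"' :: rest => scanArgs false depth commas rest
  | true, '\\' :: '"' :: rest' => scanArgs true depth commas rest'
  | true, _ :: rest => scanArgs true depth commas rest
  | false, ch :: rest =>
      if ch = '"' then scanArgs true depth commas rest
      else if ch = '(' ∨ ch = '[' ∨ ch = '{' then scanArgs false (depth + 1) commas rest
      else if ch = ')' ∨ ch = ']' ∨ ch = '}' then scanArgs false (depth - 1) commas rest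
      else if ch = ',' ∧ depth = 0 then scanArgs false depth (commas + 1) rest
      else scanArgs false depth commas rest

def count_args_py_alt (args_str : String) : Int :=
  if (PySem.Str.strip args_str).toList = [] then 0
  else scanArgs false 0 0 args_str.toList + 1

-- ===== PRECONDITION & SPEC =====
def Spec_count_args_py (args_str : String) (out : Int) : Prop := out = count_args_py_alt args_str
instance (args_str : String) (out : Int) : Decidable (Spec_count_args_py args_str out) := by unfold Spec_count_args_py; infer_instance

-- ===== CLAIM (what is proved, stated in full; the proofs are below) =====
def Claim_equal_count_args_py : Prop := ∀ (args_str : String), Dom_count_args_py args_str → Spec_count_args_py args_str (count_args_py args_str)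

-- ===== LEMMAS AND PROOFS =====

-- the fused pass equals A's fold over the erased string, for every state
theorem scan_eq_fold (l : List Char) (b : Bool) (d c : Int) :
    scanArgs b d c l = ((eraseStrings b l).foldl countStep (d, c)).2 := by
  fun_induction scanArgs b d c l <;>
    simp_all [eraseStrings, countStep] <;> split_ifs <;> simp_all

-- ===== VERDICT (by name: the statement is the Claim_ definition above) =====
theorem count_args_py_spec : Claim_equal_count_args_py := by
  intro s _
  unfold Spec_count_args_py count_args_py count_args_py_alt
  split_ifs with h
  · rfl
  · rw [scan_eq_fold]
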